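-- pv_equiv track=rewrite | github.com/kartikvrama/epic-kitchens-100-annotations | stats_vlm_annotations.py | crop_type
-- ===== SOURCE A (Python) =====
-- from collections import defaultdict
--
-- def crop_type(seg):
--     crops = seg.get("crop_from_previous_active") or []
--     if not crops:
--         return None
--     by_frame = defaultdict(int)
--     for c in crops:
--         by_frame[c.get("frame_path") or ""] += 1
--     m = max(by_frame.values())
--     return "one" if m == 1 else "more"
-- ===== SOURCE B (Python) =====
-- def crop_type(seg):
--     crops = seg.get("crop_from_previous_active") or []
--     if not crops:
--         return None
--     keys = sorted((c.get("frame_path") or "") for c in crops)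
--     for prev, cur in zip(keys, keys[1:]):
--         if prev == cur:
--             return "more"
--     return "one"
-- ===== Notes on version B (the rewrite author's own statement) =====
-- stated objective: alternative
-- what changed: Replaces the per-frame count dictionary and max-of-counts by sort-then-scan: sort the frame keys and return 'more' on the first adjacent equal pair, else 'one' (duplicates are adjacent after sorting).
import Mathlib
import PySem

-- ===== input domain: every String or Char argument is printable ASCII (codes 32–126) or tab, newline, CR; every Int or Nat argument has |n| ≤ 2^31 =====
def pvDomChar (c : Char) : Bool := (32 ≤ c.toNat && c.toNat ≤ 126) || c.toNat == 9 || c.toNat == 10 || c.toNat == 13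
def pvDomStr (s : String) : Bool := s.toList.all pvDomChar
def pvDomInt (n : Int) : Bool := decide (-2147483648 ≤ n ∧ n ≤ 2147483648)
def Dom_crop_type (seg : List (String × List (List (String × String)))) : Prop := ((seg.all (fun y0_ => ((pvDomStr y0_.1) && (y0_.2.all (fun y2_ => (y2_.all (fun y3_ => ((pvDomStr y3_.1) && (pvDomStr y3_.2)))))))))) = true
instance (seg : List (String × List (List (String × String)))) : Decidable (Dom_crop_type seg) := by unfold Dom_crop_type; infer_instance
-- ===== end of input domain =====

-- B replaces A's per-frame count dictionary and max-of-counts by sort-then-scan: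
-- sort the frame keys and report "more" on the first adjacent equal pair; objective: alternative.


-- ===== PORT A =====
-- crops = seg.get("crop_from_previous_active") or []  (None / [] both give [])
def crop_type (seg : List (String × List (List (String × String)))) : Option String :=
  let crops := ((PySem.Dict.mk seg).get? "crop_from_previous_active").getD []
  if crops = [] then none
  else
    -- by_frame = defaultdict(int); for c in crops: by_frame[c.get("frame_path") or ""] += 1
    let byFrame := crops.foldl
      (fun d c => PySem.Dict.modify d (((PySem.Dict.mk c).get? "frame_path").getD "") 0 (· + 1))
      (PySem.Dict.empty : PySem.Dict String Int)
    -- m = max(by_frame.values())  (values nonempty here, so max? is some)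
    match PySem.List.max? (PySem.Dict.values byFrame) (fun x => x) with
    | none => none
    | some m => some (if m = 1 then "one" else "more")

-- ===== PORT B =====
-- the zip(keys, keys[1:]) loop: return "more" on the first adjacent equal pair
def cropAdjDup : List String → Bool
  | a :: b :: t => if a = b then true else cropAdjDup (b :: t)
  | _ => false

def crop_type_alt (seg : List (String × List (List (String × String)))) : Option String :=
  let crops := ((PySem.Dict.mk seg).get? "crop_from_previous_active").getD []
  if crops = [] then none
  else
    let keys := PySem.List.sorted (crops.map (fun c => ((PySem.Dict.mk c).get? "frame_path").getD "")) (fun k => k) false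
    some (if cropAdjDup keys then "more" else "one")

-- ===== PRECONDITION & SPEC =====
def Spec_crop_type (seg : List (String × List (List (String × String)))) (out : Option String) : Prop := out = crop_type_alt seg
instance (seg : List (String × List (List (String × String)))) (out : Option String) : Decidable (Spec_crop_type seg out) := by unfold Spec_crop_type; infer_instance

-- ===== CLAIM (what is proved, stated in full; the proofs are below) =====
def Claim_equal_crop_type : Prop := ∀ (seg : List (String × List (List (String × String)))), Dom_crop_type seg → Spec_crop_type seg (crop_type seg)

-- ===== LEMMAS AND PROOFS =====

-- on a ≤-sorted list, no adjacent duplicate means no duplicate at all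
theorem adjDup_false_iff_nodup (l : List String) (hp : l.Pairwise (· ≤ ·)) :
    cropAdjDup l = false ↔ l.Nodup := by
  induction l with
  | nil => simp [cropAdjDup]
  | cons a t ih =>
    cases t with
    | nil => simp [cropAdjDup]
    | cons b u =>
      have hab : a ≤ b := (List.pairwise_cons.mp hp).1 b (by simp)
      have hp' := (List.pairwise_cons.mp hp).2
      rw [cropAdjDup]
      by_cases h : a = b
      · simp [h, List.nodup_cons]
      · simp only [if_neg h, ih hp', List.nodup_cons]
        constructor
        · intro ⟨hbu, hu⟩
          refine ⟨?_, hbu, hu⟩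
          simp only [List.mem_cons, not_or]
          refine ⟨h, fun hx => ?_⟩
          have hba : b ≤ a := (List.pairwise_cons.mp hp').1 a hx
          exact h (le_antisymm hab hba)
        · intro ⟨_, hbu, hu⟩
          exact ⟨hbu, hu⟩

-- the maximum of counts over the distinct keys is some m, with m = 1 iff keys are nodup
theorem max_counts_one_iff (keys : List String) (hne : keys ≠ []) :
    ∃ m : Int, PySem.List.max? ((PySem.Set.ofList keys).map (fun k => ((keys.count k : Int)))) (fun x => x) = some m
      ∧ ((m = 1) ↔ keys.Nodup) := by
  have hS : PySem.Set.ofList keys ≠ [] := by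
    intro h
    cases keys with
    | nil => exact hne rfl
    | cons a t =>
      have : a ∈ PySem.Set.ofList (a :: t) := (PySem.Set.mem_ofList _ _).mpr (by simp)
      rw [h] at this; simp at this
  have hvals : (PySem.Set.ofList keys).map (fun k => ((keys.count k : Int))) ≠ [] := by
    simpa using hS
  obtain ⟨m, hm⟩ : ∃ m, PySem.List.max? ((PySem.Set.ofList keys).map (fun k => ((keys.count k : Int)))) (fun x => x) = some m := by
    cases hmx : PySem.List.max? ((PySem.Set.ofList keys).map (fun k => ((keys.count k : Int)))) (fun x => x) with
    | none => exact absurd ((PySem.List.max?_eq_none_iff _ _).mp hmx) hvals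
    | some m => exact ⟨m, rfl⟩
  refine ⟨m, hm, ?_⟩
  have hmem := PySem.List.max?_mem hm
  have hmax := PySem.List.max?_isMax hm
  obtain ⟨k0, hk0S, hk0⟩ := List.mem_map.mp hmem
  have hk0keys : k0 ∈ keys := (PySem.Set.mem_ofList _ _).mp hk0S
  constructor
  · intro h1
    rw [List.nodup_iff_count_le_one]
    intro a
    by_cases ha : a ∈ keys
    · have haS : a ∈ PySem.Set.ofList keys := (PySem.Set.mem_ofList _ _).mpr ha
      have := hmax _ (List.mem_map.mpr ⟨a, haS, rfl⟩)
      simp only at this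
      rw [h1] at this
      exact_mod_cast this
    · simp [List.count_eq_zero_of_not_mem ha]
  · intro hnd
    have : keys.count k0 = 1 := List.count_eq_one_of_mem hnd hk0keys
    rw [← hk0, this]; rfl

-- ===== VERDICT (by name: the statement is the Claim_ definition above) =====
theorem crop_type_spec : Claim_equal_crop_type := by
  intro seg _
  simp only [Spec_crop_type, crop_type, crop_type_alt]
  by_cases h : ((PySem.Dict.mk seg).get? "crop_from_previous_active").getD [] = []
  · simp [h]
  · simp only [if_neg h]
    set crops := ((PySem.Dict.mk seg).get? "crop_from_previous_active").getD [] with hcrops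
    have hfold : crops.foldl
        (fun d c => PySem.Dict.modify d (((PySem.Dict.mk c).get? "frame_path").getD "") 0 (· + 1))
        (PySem.Dict.empty : PySem.Dict String Int)
        = PySem.Dict.counter (crops.map (fun c => ((PySem.Dict.mk c).get? "frame_path").getD "")) := by
      rw [PySem.Dict.counter_eq_foldl, List.foldl_map]
    simp only [hfold]
    set keys := crops.map (fun c => ((PySem.Dict.mk c).get? "frame_path").getD "") with hkeys
    have hkne : keys ≠ [] := by simpa [hkeys] using h
    have hvals : PySem.Dict.values (PySem.Dict.counter keys)
        = (PySem.Set.ofList keys).map (fun k => ((keys.count k : Int))) := by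
      simp only [PySem.Dict.values, PySem.Dict.items_counter, List.map_map]
      rfl
    rw [hvals]
    obtain ⟨m, hm, hiff⟩ := max_counts_one_iff keys hkne
    rw [hm]
    have hsortnd : (PySem.List.sorted keys (fun k => k) false).Nodup ↔ keys.Nodup :=
      (PySem.List.sorted_perm keys (fun k => k) false).nodup_iff
    have hadj : cropAdjDup (PySem.List.sorted keys (fun k => k) false) = false ↔ keys.Nodup :=
      (adjDup_false_iff_nodup _ (PySem.List.sorted_pairwise keys (fun k => k))).trans hsortnd
    by_cases hnd : keys.Nodup
    · simp [hiff.mpr hnd, hadj.mpr hnd]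
    · have h1 : ¬ m = 1 := fun h1 => hnd (hiff.mp h1)
      have h2 : cropAdjDup (PySem.List.sorted keys (fun k => k) false) = true := by
        revert hadj; cases cropAdjDup (PySem.List.sorted keys (fun k => k) false) <;> simp_all
      simp [h1, h2]
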